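-- pv_equiv track=rewrite | github.com/lchenplotkin/oxford_august | older/SUMMER_END/reorder.py | smooth_anchors
-- ===== SOURCE A (Python) =====
-- def smooth_anchors(anchors):
-- 	out = anchors[:]
--
-- 	last = None
-- 	for i in range(len(out)):
-- 		if out[i] is not None:
-- 			last = out[i]
-- 		elif last is not None:
-- 			out[i] = last
--
-- 	last = None
-- 	for i in range(len(out) - 1, -1, -1):
-- 		if anchors[i] is not None:
-- 			last = anchors[i]
-- 		elif last is not None:
-- 			out[i] = last
--
-- 	return out
-- ===== SOURCE B (Python) =====
-- def smooth_anchors(anchors):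
--     positions = [i for i, v in enumerate(anchors) if v is not None]
--     out = anchors[:]
--     if not positions:
--         return out
--     last_val = anchors[positions[-1]]
--     p = 0
--     for i in range(len(out)):
--         while p < len(positions) and positions[p] < i:
--             p += 1
--         out[i] = anchors[positions[p]] if p < len(positions) else last_val
--     return out
-- ===== Notes on version B (the rewrite author's own statement) =====
-- stated objective: alternative
-- what changed: Replaces A's two in-place directional fill passes by building an index table of non-null positions once, then a single left-to-right sweep with a monotone pointer into that table picks the nearest non-null at-or-right value, falling back to the last non-null for the trailing gap.
import Mathlib
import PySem

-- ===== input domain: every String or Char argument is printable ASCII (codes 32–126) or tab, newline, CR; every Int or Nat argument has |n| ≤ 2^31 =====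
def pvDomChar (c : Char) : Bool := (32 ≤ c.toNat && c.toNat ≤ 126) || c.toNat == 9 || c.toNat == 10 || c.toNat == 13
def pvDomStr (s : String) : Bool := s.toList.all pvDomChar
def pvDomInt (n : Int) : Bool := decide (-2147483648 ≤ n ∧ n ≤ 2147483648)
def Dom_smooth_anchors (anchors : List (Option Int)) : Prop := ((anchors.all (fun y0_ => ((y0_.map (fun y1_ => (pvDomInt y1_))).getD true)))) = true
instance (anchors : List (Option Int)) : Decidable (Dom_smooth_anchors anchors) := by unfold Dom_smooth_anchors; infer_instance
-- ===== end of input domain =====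

-- B replaces A's two directional fill passes by an index table of non-null positions plus one pointer sweep; same O(n) cost, alternative structure.


-- ===== PORT A =====
-- forward pass: carry `last`, fill a None from the left neighbour
def passFwd (last : Option Int) : List (Option Int) → List (Option Int)
  | [] => []
  | x :: xs =>
    match x with
    | some v => some v :: passFwd (some v) xs
    | none =>
      match last with
      | some v => some v :: passFwd last xs
      | none => none :: passFwd none xs

-- backward pass (structural recursion processes higher indices first, like the reversed range):
-- walks anchors and out together; returns the updated out and the running `last`
def passBwd : List (Option Int) → List (Option Int) → List (Option Int) × Option Int
  | [], _ => ([], none)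
  | _ :: _, [] => ([], none)
  | a :: as_, o :: os =>
    let r := passBwd as_ os
    match a with
    | some v => (o :: r.1, some v)
    | none =>
      match r.2 with
      | some w => (some w :: r.1, some w)
      | none => (o :: r.1, none)

def smooth_anchors (anchors : List (Option Int)) : List (Option Int) :=
  (passBwd anchors (passFwd none anchors)).1

-- ===== PORT B =====
-- positions = [i for i, v in enumerate(anchors) if v is not None]
def bPositions (i : Nat) : List (Option Int) → List Nat
  | [] => []
  | x :: xs => if x.isSome then i :: bPositions (i + 1) xs else bPositions (i + 1) xs

-- the sweep: for each i, advance the pointer (dropWhile = the while loop), then pick the value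
def bSweep (anchors : List (Option Int)) (lastVal : Option Int) : List Nat → List Nat → List (Option Int)
  | [], _ => []
  | i :: is_, ps =>
    let ps' := ps.dropWhile (fun q => decide (q < i))
    (match ps' with
     | q :: _ => anchors.getD q none
     | [] => lastVal) :: bSweep anchors lastVal is_ ps'

def smooth_anchors_alt (anchors : List (Option Int)) : List (Option Int) :=
  match bPositions 0 anchors with
  | [] => anchors
  | q :: qs =>
    let lastVal := anchors.getD ((q :: qs).getLastD 0) none
    bSweep anchors lastVal (List.range anchors.length) (q :: qs)

-- ===== PRECONDITION & SPEC =====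
def Spec_smooth_anchors (anchors : List (Option Int)) (out : List (Option Int)) : Prop := out = smooth_anchors_alt anchors
instance (anchors : List (Option Int)) (out : List (Option Int)) : Decidable (Spec_smooth_anchors anchors out) := by unfold Spec_smooth_anchors; infer_instance

-- ===== CLAIM (what is proved, stated in full; the proofs are below) =====
def Claim_equal_smooth_anchors : Prop := ∀ (anchors : List (Option Int)), Dom_smooth_anchors anchors → Spec_smooth_anchors anchors (smooth_anchors anchors)

-- ===== LEMMAS AND PROOFS =====

-- first non-None value of a list
def fso : List (Option Int) → Option Int
  | [] => none
  | some v :: _ => some v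
  | none :: xs => fso xs

-- last non-None value of a list
def lso : List (Option Int) → Option Int
  | [] => none
  | x :: xs => match lso xs with | some v => some v | none => x

-- the common midpoint: out[i] = nearest non-None at-or-right, else lastVal
def mid (lastVal : Option Int) : List (Option Int) → List (Option Int)
  | [] => []
  | x :: xs =>
    (match fso (x :: xs) with | some v => some v | none => lastVal) :: mid lastVal xs

lemma fso_none_lso : ∀ xs : List (Option Int), fso xs = none → lso xs = none := by
  intro xs
  induction xs with
  | nil => intro _; rfl
  | cons x xs ih =>
    cases x with
    | some v => intro h; simp [fso] at h
    | none => intro h; simp [fso] at h; simp [lso, ih h]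

lemma lso_none_fso : ∀ xs : List (Option Int), lso xs = none → fso xs = none := by
  intro xs
  induction xs with
  | nil => intro _; rfl
  | cons x xs ih =>
    cases x with
    | some v =>
      intro h; simp [lso] at h
      cases hl : lso xs <;> simp [hl] at h
    | none =>
      intro h; simp [lso] at h
      cases hl : lso xs with
      | none => simp [fso, ih hl]
      | some w => simp [hl] at h

-- ===== A-side: A equals the midpoint =====
lemma passA_eq (a : List (Option Int)) : ∀ last,
    passBwd a (passFwd last a) =
      (mid (match lso a with | some v => some v | none => last) a, fso a) := by
  induction a with
  | nil => intro last; rfl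
  | cons x xs ih =>
    intro last
    cases x with
    | some v =>
      simp only [passFwd, passBwd, ih (some v), fso, lso, mid]
      cases hl : lso xs <;> simp
    | none =>
      cases hl : fso xs with
      | some w =>
        cases last with
        | some u =>
          simp only [passFwd, passBwd, ih (some u), fso, lso, mid, hl]
          cases hls : lso xs <;> simp
        | none =>
          simp only [passFwd, passBwd, ih none, fso, lso, mid, hl]
          cases hls : lso xs <;> simp
      | none =>
        have hlso := fso_none_lso xs hl
        cases last with
        | some u =>
          simp only [passFwd, passBwd, ih (some u), fso, lso, mid, hl, hlso]
        | none =>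
          simp only [passFwd, passBwd, ih none, fso, lso, mid, hl, hlso]

lemma sideA (anchors : List (Option Int)) :
    smooth_anchors anchors = mid (lso anchors) anchors := by
  unfold smooth_anchors
  rw [passA_eq anchors none]
  cases h : lso anchors <;> simp

-- ===== B-side lemmas =====
lemma dropWhile_mono (p q : Nat → Bool) (h : ∀ x, q x = true → p x = true) :
    ∀ l : List Nat, (l.dropWhile q).dropWhile p = l.dropWhile p := by
  intro l
  induction l with
  | nil => rfl
  | cons x l ih =>
    by_cases hq : q x = true
    · rw [List.dropWhile_cons_of_pos hq, List.dropWhile_cons_of_pos (h x hq), ih]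
    · rw [List.dropWhile_cons_of_neg hq]

lemma bPositions_ge : ∀ (xs : List (Option Int)) (i : Nat), ∀ m ∈ bPositions i xs, i ≤ m := by
  intro xs
  induction xs with
  | nil => intro i m hm; simp [bPositions] at hm
  | cons x xs ih =>
    intro i m hm
    by_cases hx : x.isSome
    · simp [bPositions, hx] at hm
      rcases hm with h | h
      · omega
      · have := ih (i + 1) m h; omega
    · simp [bPositions, hx] at hm
      have := ih (i + 1) m hm; omega

lemma dropWhile_false_of_all (p : Nat → Bool) :
    ∀ l : List Nat, (∀ x ∈ l, p x = false) → l.dropWhile p = l := by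
  intro l h
  cases l with
  | nil => rfl
  | cons x l => exact List.dropWhile_cons_of_neg (by simp [h x (by simp)])

lemma posDrop : ∀ (j : Nat) (xs : List (Option Int)) (i : Nat),
    (bPositions i xs).dropWhile (fun q => decide (q < i + j)) = bPositions (i + j) (xs.drop j) := by
  intro j
  induction j with
  | zero =>
    intro xs i
    simp only [Nat.add_zero, List.drop_zero]
    apply dropWhile_false_of_all
    intro m hm
    have := bPositions_ge xs i m hm
    simp; omega
  | succ j ih =>
    intro xs i
    cases xs with
    | nil => simp [bPositions]
    | cons x xs =>
      have harith : i + (j + 1) = (i + 1) + j := by omega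
      by_cases hx : x.isSome
      · simp only [bPositions, hx, if_pos]
        rw [List.dropWhile_cons_of_pos (by simp)]
        rw [harith, ih xs (i + 1)]
        simp
      · simp only [bPositions]
        rw [if_neg (by simp [hx]), harith, ih xs (i + 1)]
        simp

lemma getD_of_drop (anchors : List (Option Int)) (i : Nat) (x : Option Int)
    (xs : List (Option Int)) (h : anchors.drop i = x :: xs) :
    anchors.getD i none = x := by
  have h0 : (List.drop i anchors)[0]? = anchors[i + 0]? := List.getElem?_drop
  rw [h] at h0
  simp at h0
  simp [List.getD, ← h0]

lemma drop_succ_of_drop (anchors : List (Option Int)) (i : Nat) (x : Option Int)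
    (xs : List (Option Int)) (h : anchors.drop i = x :: xs) :
    anchors.drop (i + 1) = xs := by
  have h1 : anchors.drop (i + 1) = (anchors.drop i).drop 1 := by
    rw [List.drop_drop]
  simp [h1, h]

lemma posHead : ∀ (xs : List (Option Int)) (i : Nat) (anchors : List (Option Int)),
    anchors.drop i = xs →
    (match bPositions i xs with
     | [] => (none : Option Int)
     | q :: _ => anchors.getD q none) = fso xs := by
  intro xs
  induction xs with
  | nil => intro i anchors _; rfl
  | cons x xs ih =>
    intro i anchors h
    have hx0 := getD_of_drop anchors i x xs h
    have htail := drop_succ_of_drop anchors i x xs h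
    cases x with
    | some v =>
      simp only [bPositions, Option.isSome_some, if_pos]
      simpa [fso, List.getD] using hx0
    | none =>
      simp only [bPositions, Option.isSome_none, Bool.false_eq_true, fso]
      rw [if_neg (by simp)]
      exact ih (i + 1) anchors htail

lemma posEmpty_fso : ∀ (xs : List (Option Int)) (i : Nat),
    bPositions i xs = [] → fso xs = none := by
  intro xs
  induction xs with
  | nil => intro i _; rfl
  | cons x xs ih =>
    intro i h
    cases x with
    | some v => simp [bPositions] at h
    | none => simp [bPositions] at h; simp [fso, ih (i + 1) h]

lemma fso_none_pos : ∀ (xs : List (Option Int)) (i : Nat),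
    fso xs = none → bPositions i xs = [] := by
  intro xs
  induction xs with
  | nil => intro i _; rfl
  | cons x xs ih =>
    intro i h
    cases x with
    | some v => simp [fso] at h
    | none => simp [fso] at h; simp [bPositions, ih (i + 1) h]

lemma mid_none : ∀ xs : List (Option Int), fso xs = none → mid none xs = xs := by
  intro xs
  induction xs with
  | nil => intro _; rfl
  | cons x xs ih =>
    intro h
    cases x with
    | some v => simp [fso] at h
    | none => simp [fso] at h; simp [mid, fso, h, ih h]

lemma posLast : ∀ (xs : List (Option Int)) (i : Nat) (anchors : List (Option Int)),
    anchors.drop i = xs → ∀ q qs, bPositions i xs = q :: qs →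
    anchors.getD ((q :: qs).getLastD 0) none = lso xs := by
  intro xs
  induction xs with
  | nil => intro i anchors _ q qs h; simp [bPositions] at h
  | cons x xs ih =>
    intro i anchors h q qs hpos
    have hx0 := getD_of_drop anchors i x xs h
    have htail := drop_succ_of_drop anchors i x xs h
    cases x with
    | some v =>
      simp only [bPositions, Option.isSome_some, if_pos] at hpos
      injection hpos with h1 h2
      subst h1
      cases hb : bPositions (i + 1) xs with
      | nil =>
        rw [hb] at h2; subst h2
        have hfso := posEmpty_fso xs (i + 1) hb
        have hlso := fso_none_lso xs hfso
        simp [List.getLastD, lso, hlso]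
        simpa [List.getD] using hx0
      | cons q' qs' =>
        rw [hb] at h2; subst h2
        have hIH := ih (i + 1) anchors htail q' qs' hb
        cases hls : lso xs with
        | none =>
          exfalso
          have := fso_none_pos xs (i + 1) (lso_none_fso xs hls)
          rw [hb] at this
          simp at this
        | some w =>
          rw [hls] at hIH
          simp only [List.getLastD_cons]
          simp only [List.getLastD_cons] at hIH
          rw [hIH]
          simp [lso, hls]
    | none =>
      simp only [bPositions, Option.isSome_none, Bool.false_eq_true] at hpos
      rw [if_neg (by simp)] at hpos
      have hIH := ih (i + 1) anchors htail q qs hpos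
      cases hls : lso xs with
      | none =>
        exfalso
        have := fso_none_pos xs (i + 1) (lso_none_fso xs hls)
        rw [hpos] at this
        simp at this
      | some w =>
        rw [hls] at hIH
        rw [hIH]
        simp [lso, hls]

-- the sweep equals the midpoint
lemma sweep_main : ∀ (suf : List (Option Int)) (j : Nat) (anchors : List (Option Int))
    (lastVal : Option Int) (ps : List Nat),
    anchors.drop j = suf →
    ps.dropWhile (fun q => decide (q < j)) = (bPositions 0 anchors).dropWhile (fun q => decide (q < j)) →
    bSweep anchors lastVal (List.range' j suf.length) ps = mid lastVal suf := by
  intro suf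
  induction suf with
  | nil => intro j anchors lastVal ps _ _; simp [bSweep, mid]
  | cons x xs ih =>
    intro j anchors lastVal ps h hps
    have hps' : ps.dropWhile (fun q => decide (q < j)) = bPositions j (x :: xs) := by
      rw [hps]
      have hd := posDrop j anchors 0
      simp only [Nat.zero_add] at hd
      rw [hd, h]
    show bSweep anchors lastVal (j :: List.range' (j + 1) xs.length) ps = mid lastVal (x :: xs)
    simp only [bSweep, mid, hps']
    have hB : bPositions j (x :: xs) = (bPositions 0 anchors).dropWhile (fun q => decide (q < j)) :=
      hps'.symm.trans hps
    congr 1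
    · -- heads agree
      cases hb : bPositions j (x :: xs) with
      | nil =>
        have := posEmpty_fso (x :: xs) j hb
        simp [this]
      | cons q t =>
        have hh := posHead (x :: xs) j anchors h
        rw [hb] at hh
        cases hf : fso (x :: xs) with
        | none =>
          exfalso
          have := fso_none_pos (x :: xs) j hf
          rw [hb] at this
          simp at this
        | some w =>
          rw [hf] at hh
          simp only [List.getD] at hh
          simpa [List.getD] using hh
    · -- tails agree, by the IH at j+1
      apply ih (j + 1) anchors lastVal (bPositions j (x :: xs))
      · exact drop_succ_of_drop anchors j x xs h
      · rw [hB]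
        exact dropWhile_mono _ _ (by intro y hy; simp at hy ⊢; omega) (bPositions 0 anchors)

-- ===== VERDICT (by name: the statement is the Claim_ definition above) =====
theorem smooth_anchors_spec : Claim_equal_smooth_anchors := by
  intro anchors _
  unfold Spec_smooth_anchors
  rw [sideA]
  unfold smooth_anchors_alt
  cases h : bPositions 0 anchors with
  | nil =>
    have hfso := posEmpty_fso anchors 0 h
    rw [fso_none_lso anchors hfso, mid_none anchors hfso]
  | cons q qs =>
    have hlast := posLast anchors 0 anchors (by simp) q qs h
    rw [List.range_eq_range']
    show mid (lso anchors) anchors =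
      bSweep anchors (anchors.getD ((q :: qs).getLastD 0) none) (List.range' 0 anchors.length) (q :: qs)
    rw [sweep_main anchors 0 anchors _ (q :: qs) (by simp) (by rw [h]), hlast]
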